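-- pv_equiv track=rewrite | github.com/Shuaicong97/data_processing | SVAGEval/prediction_processing/generate_submission.py | build_spatial_array
-- ===== SOURCE A (Python) =====
-- def build_spatial_array(track_frames, video_length):
--     spatial = []
--     for frame_id in range(video_length):
--         if frame_id+1 in track_frames:
--             spatial.append(track_frames[frame_id+1])
--         else:
--             spatial.append(None)
--     return spatial
-- ===== SOURCE B (Python) =====
-- def build_spatial_array(track_frames, video_length):
--     spatial = [None] * video_length
--     for key, value in track_frames.items():
--         if 1 <= key <= video_length:
--             spatial[key - 1] = value
--     return spatial
-- ===== Notes on version B (the rewrite author's own statement) =====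
-- stated objective: alternative
-- what changed: B preallocates spatial = [None]*video_length and scatters the dict items into their slots (guarding keys to 1..video_length), instead of gathering per frame index with a membership test and lookup.
import Mathlib
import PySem

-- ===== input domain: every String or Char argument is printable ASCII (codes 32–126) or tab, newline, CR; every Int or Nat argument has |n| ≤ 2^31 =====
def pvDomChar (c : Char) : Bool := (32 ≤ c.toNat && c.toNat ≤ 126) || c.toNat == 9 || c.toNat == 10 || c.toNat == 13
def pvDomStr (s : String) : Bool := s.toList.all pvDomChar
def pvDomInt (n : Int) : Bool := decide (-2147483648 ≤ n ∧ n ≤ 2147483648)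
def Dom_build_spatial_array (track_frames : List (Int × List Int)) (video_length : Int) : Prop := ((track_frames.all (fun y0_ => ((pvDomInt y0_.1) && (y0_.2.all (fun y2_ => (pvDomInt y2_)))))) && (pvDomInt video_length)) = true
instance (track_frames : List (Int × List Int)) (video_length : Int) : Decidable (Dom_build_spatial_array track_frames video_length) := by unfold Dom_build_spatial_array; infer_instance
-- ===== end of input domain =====

-- B scatters track items into a preallocated None array instead of gathering per frame index (alternative decomposition, same cost).


-- ===== PORT A =====
def build_spatial_array (track_frames : List (Int × List Int)) (video_length : Int) : List (Option (List Int)) :=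
  (PySem.List.pyRange 0 video_length 1).foldl
    (fun spatial frame_id =>
      match PySem.Dict.get? (PySem.Dict.mk track_frames) (frame_id + 1) with
      | some v => spatial ++ [some v]
      | none => spatial ++ [none])
    []

-- ===== PORT B =====
-- one loop step of Source B: scatter one (key, value) item into its slot if 1 <= key <= video_length
def pvScatter (video_length : Int) (spatial : List (Option (List Int))) (p : Int × List Int) : List (Option (List Int)) :=
  if 1 ≤ p.1 ∧ p.1 ≤ video_length then spatial.set (p.1 - 1).toNat (some p.2) else spatial

def build_spatial_array_alt (track_frames : List (Int × List Int)) (video_length : Int) : List (Option (List Int)) :=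
  track_frames.foldl (pvScatter video_length) (List.replicate video_length.toNat none)

-- ===== PRECONDITION & SPEC =====
-- track_frames models a Python dict, whose keys are unique; Pre_ is that representation invariant:
-- association lists with duplicate keys do not correspond to any Python dict input and are excluded.
def Pre_build_spatial_array (track_frames : List (Int × List Int)) (video_length : Int) : Prop :=
  (track_frames.map Prod.fst).Nodup
instance (track_frames : List (Int × List Int)) (video_length : Int) : Decidable (Pre_build_spatial_array track_frames video_length) := by unfold Pre_build_spatial_array; infer_instance

def pvWitness_build_spatial_array : (List (Int × List Int)) × Int := ([(1, [5]), (3, [7, 8])], 3)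

def Spec_build_spatial_array (track_frames : List (Int × List Int)) (video_length : Int) (out : List (Option (List Int))) : Prop := out = build_spatial_array_alt track_frames video_length
instance (track_frames : List (Int × List Int)) (video_length : Int) (out : List (Option (List Int))) : Decidable (Spec_build_spatial_array track_frames video_length out) := by unfold Spec_build_spatial_array; infer_instance

-- ===== CLAIM (what is proved, stated in full; the proofs are below) =====
def Claim_equal_build_spatial_array : Prop := ∀ (track_frames : List (Int × List Int)) (video_length : Int), Dom_build_spatial_array track_frames video_length → Pre_build_spatial_array track_frames video_length → Spec_build_spatial_array track_frames video_length (build_spatial_array track_frames video_length)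

-- ===== LEMMAS AND PROOFS =====

-- A's append loop is a map over the range
theorem foldl_append_singleton {α β : Type} (g : α → β) (xs : List α) (acc : List β) :
    xs.foldl (fun a x => a ++ [g x]) acc = acc ++ xs.map g := by
  induction xs generalizing acc with
  | nil => simp
  | cons x t ih => simp [List.foldl, ih]

theorem portA_eq_map (track_frames : List (Int × List Int)) (video_length : Int) :
    build_spatial_array track_frames video_length =
      (PySem.List.pyRange 0 video_length 1).map
        (fun fid => PySem.Dict.get? (PySem.Dict.mk track_frames) (fid + 1)) := by
  unfold build_spatial_array
  have hf : (fun (spatial : List (Option (List Int))) (frame_id : Int) =>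
      match PySem.Dict.get? (PySem.Dict.mk track_frames) (frame_id + 1) with
      | some v => spatial ++ [some v]
      | none => spatial ++ [none]) =
      (fun spatial frame_id => spatial ++ [PySem.Dict.get? (PySem.Dict.mk track_frames) (frame_id + 1)]) := by
    funext sp fid
    cases PySem.Dict.get? (PySem.Dict.mk track_frames) (fid + 1) <;> rfl
  rw [hf, foldl_append_singleton]
  simp

theorem scatter_length (video_length : Int) (l : List (Int × List Int)) (init : List (Option (List Int))) :
    (l.foldl (pvScatter video_length) init).length = init.length := by
  induction l generalizing init with
  | nil => rfl
  | cons p t ih =>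
      simp only [List.foldl]
      rw [ih]
      unfold pvScatter
      split <;> simp

theorem scatter_get_notmem (video_length : Int) (i : Nat) (l : List (Int × List Int))
    (init : List (Option (List Int))) (h : ((i : Int) + 1) ∉ l.map Prod.fst) :
    (l.foldl (pvScatter video_length) init)[i]? = init[i]? := by
  induction l generalizing init with
  | nil => rfl
  | cons p t ih =>
      simp only [List.map, List.mem_cons, not_or] at h
      simp only [List.foldl]
      rw [ih _ h.2]
      unfold pvScatter
      split
      · next hc =>
          rw [List.getElem?_set_ne]
          intro he
          have h1 : (1 : Int) ≤ p.1 := hc.1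
          omega
      · rfl

theorem get?_mk_none {l : List (Int × List Int)} {x : Int}
    (h : PySem.Dict.get? (PySem.Dict.mk l) x = none) : x ∉ l.map Prod.fst := by
  induction l with
  | nil => simp
  | cons p t ih =>
      rw [show PySem.Dict.mk (p :: t) = PySem.Dict.mk ((p.1, p.2) :: t) by simp,
        PySem.Dict.get?_mk_cons] at h
      by_cases hx : p.1 = x
      · simp [hx] at h
      · simp only [beq_iff_eq, hx, if_false] at h
        simp only [List.map, List.mem_cons, not_or]
        exact ⟨fun he => hx he.symm, ih h⟩

theorem scatter_get_mem (video_length : Int) (i : Nat) (hin : (i : Int) + 1 ≤ video_length)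
    (l : List (Int × List Int)) :
    ∀ (init : List (Option (List Int))) (v : List Int), (l.map Prod.fst).Nodup →
      PySem.Dict.get? (PySem.Dict.mk l) ((i : Int) + 1) = some v → i < init.length →
      (l.foldl (pvScatter video_length) init)[i]? = some (some v) := by
  induction l with
  | nil => intro init v _ hg _; simp [PySem.Dict.get?] at hg
  | cons p t ih =>
      intro init v hnd hg hi
      rw [show PySem.Dict.mk (p :: t) = PySem.Dict.mk ((p.1, p.2) :: t) by simp,
        PySem.Dict.get?_mk_cons] at hg
      simp only [List.map, List.nodup_cons] at hnd
      by_cases hk : p.1 = (i : Int) + 1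
      · simp only [hk, beq_self_eq_true, if_true, Option.some.injEq] at hg
        simp only [List.foldl]
        have hnm : ((i : Int) + 1) ∉ t.map Prod.fst := hk ▸ hnd.1
        rw [scatter_get_notmem _ _ _ _ hnm]
        unfold pvScatter
        rw [if_pos (by constructor <;> omega)]
        rw [show (p.1 - 1).toNat = i by omega]
        rw [List.getElem?_set_self (by omega), hg]
      · simp only [beq_iff_eq, hk, if_false] at hg
        simp only [List.foldl]
        apply ih _ _ hnd.2 hg
        unfold pvScatter
        split <;> simp [hi]

-- ===== VERDICT (by name: the statement is the Claim_ definition above) =====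
theorem build_spatial_array_spec : Claim_equal_build_spatial_array := by
  intro tf n _ hpre
  unfold Spec_build_spatial_array
  rw [portA_eq_map]
  apply List.ext_getElem?
  intro i
  unfold build_spatial_array_alt
  by_cases hi : i < n.toNat
  · rw [List.getElem?_map, PySem.List.getElem?_pyRange_one]
    rw [if_pos (by omega)]
    have hin : (i : Int) + 1 ≤ n := by omega
    cases hg : PySem.Dict.get? (PySem.Dict.mk tf) ((i : Int) + 1) with
    | some v =>
        rw [scatter_get_mem n i hin tf _ v hpre hg (by simp [hi])]
        simp [hg]
    | none =>
        rw [scatter_get_notmem n i tf _ (get?_mk_none hg)]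
        rw [List.getElem?_replicate, if_pos hi]
        simp [hg]
  · rw [List.getElem?_eq_none, List.getElem?_eq_none]
    · rw [scatter_length]; simp; omega
    · rw [List.length_map, PySem.List.length_pyRange_one]; omega
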